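-- pv_equiv track=rewrite | github.com/glennfeys/Discrete-algorithms | project_4/niels_laurens/graycode.py | grayCodeRank
-- ===== SOURCE A (Python) =====
-- def grayCodeRank(n, subset):
--     r = 0
--     b = 0
--     for i in range(n-1, -1, -1):
--         if n-i in subset:
--             b = 1-b
--         if b == 1:
--             r += 2**i
--     return r
-- ===== SOURCE B (Python) =====
-- def grayCodeRank(n, subset):
--     # Stateless one pass: a toggle at position i flips the running parity of
--     # every bit i..0, i.e. XORs the low mask (1 << (i+1)) - 1 into the rank.
--     r = 0
--     for i in range(n):
--         if n - i in subset:
--             r ^= (1 << (i + 1)) - 1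
--     return r
-- ===== Notes on version B (the rewrite author's own statement) =====
-- stated objective: faster
-- what changed: Replaces the descending scan with a running parity bit and a fresh 2**i big-int addition at every position by a stateless ascending pass that XORs the low bit-mask (1<<(i+1))-1 into the result only at selected positions.
import Mathlib
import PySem

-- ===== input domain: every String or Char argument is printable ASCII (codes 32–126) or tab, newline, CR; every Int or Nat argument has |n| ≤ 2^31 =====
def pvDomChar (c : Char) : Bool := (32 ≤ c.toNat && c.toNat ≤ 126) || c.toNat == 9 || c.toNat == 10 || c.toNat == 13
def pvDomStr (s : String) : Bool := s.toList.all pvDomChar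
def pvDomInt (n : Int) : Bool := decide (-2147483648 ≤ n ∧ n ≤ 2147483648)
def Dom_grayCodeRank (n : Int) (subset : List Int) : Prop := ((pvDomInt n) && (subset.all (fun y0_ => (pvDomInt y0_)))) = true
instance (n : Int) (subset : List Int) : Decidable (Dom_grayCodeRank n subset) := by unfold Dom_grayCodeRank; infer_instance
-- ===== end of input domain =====

-- B replaces A's descending running-parity scan with per-position 2**i additions by a stateless
-- ascending pass XOR-ing the low mask (1<<(i+1))-1 per selected position (measured faster); both total.

-- ===== PORT A =====
-- state (r, b); i runs n-1, n-2, …, 0.  Python's 2**i with i ≥ 0 is (2:Int)^i.toNat (exact,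
-- every i in the range is nonnegative).
def grayCodeRank (n : Int) (subset : List Int) : Int :=
  ((PySem.List.pyRange (n-1) (-1) (-1)).foldl
    (fun (s : Int × Int) i =>
      let b := if subset.contains (n - i) then 1 - s.2 else s.2
      ((if b == 1 then s.1 + (2:Int) ^ i.toNat else s.1), b))
    (0, 0)).1

-- ===== PORT B =====
-- Python's 1 << (i+1) with i ≥ 0 in the range: shift amount (i+1).toNat is exact.
def grayCodeRank_alt (n : Int) (subset : List Int) : Int :=
  (PySem.List.pyRange 0 n 1).foldl
    (fun r i =>
      if subset.contains (n - i) then PySem.Int.bxor r ((1 <<< (i+1).toNat) - 1) else r)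
    0

-- ===== PRECONDITION & SPEC =====
def Spec_grayCodeRank (n : Int) (subset : List Int) (out : Int) : Prop := out = grayCodeRank_alt n subset
instance (n : Int) (subset : List Int) (out : Int) : Decidable (Spec_grayCodeRank n subset out) := by unfold Spec_grayCodeRank; infer_instance

-- ===== CLAIM (what is proved, stated in full; the proofs are below) =====
def Claim_equal_grayCodeRank : Prop := ∀ (n : Int) (subset : List Int), Dom_grayCodeRank n subset → Spec_grayCodeRank n subset (grayCodeRank n subset)

-- ===== LEMMAS AND PROOFS =====

-- Nat model of A's loop: positions k-1, k-2, …, 0 with running parity b.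
def pvAD (p : Nat → Bool) (b : Bool) : Nat → Nat
  | 0 => 0
  | k+1 => (if xor b (p k) then 2^k else 0) + pvAD p (xor b (p k)) k

-- Nat model of B's loop: XOR of low masks over positions 0, …, k-1.
def pvBX (p : Nat → Bool) : Nat → Nat
  | 0 => 0
  | k+1 => pvBX p k ^^^ (if p k then 2^(k+1) - 1 else 0)

theorem pvXor_lt {s : Nat} : ∀ {x y : Nat}, x < 2^s → y < 2^s → x ^^^ y < 2^s := by
  induction s with
  | zero => intro x y hx hy; interval_cases x; interval_cases y; decide
  | succ s ih =>
    intro x y hx hy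
    have h2 : (x ^^^ y) / 2 = x/2 ^^^ y/2 := Nat.xor_div_two
    have hd : x/2 ^^^ y/2 < 2^s := ih (by omega) (by omega)
    have hm : (x ^^^ y) % 2 < 2 := Nat.mod_lt _ (by omega)
    have := Nat.div_add_mod (x ^^^ y) 2
    have hp : 2^(s+1) = 2 * 2^s := by ring
    omega

theorem pvPow_add_eq_xor : ∀ (s : Nat) {x : Nat}, x < 2^s → 2^s + x = 2^s ^^^ x := by
  intro s
  induction s with
  | zero => intro x hx; interval_cases x; decide
  | succ s ih =>
    intro x hx
    have h2 : (2^(s+1) ^^^ x) / 2 = 2^(s+1)/2 ^^^ x/2 := Nat.xor_div_two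
    have hps : 2^(s+1) = 2 * 2^s := by ring
    have hd2 : 2^(s+1)/2 = 2^s := by omega
    rw [hd2] at h2
    have hih : 2^s + x/2 = 2^s ^^^ x/2 := ih (by omega)
    have hm : (2^(s+1) ^^^ x) % 2 = (2^(s+1) + x) % 2 := Nat.xor_mod_two_eq
    have := Nat.div_add_mod (2^(s+1) ^^^ x) 2
    have h2m : (2^(s+1) + x) % 2 = x % 2 := by omega
    have := Nat.div_add_mod x 2
    omega

theorem pvBX_lt (p : Nat → Bool) : ∀ k, pvBX p k < 2^k := by
  intro k
  induction k with
  | zero => simp [pvBX]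
  | succ k ih =>
    have h1 : pvBX p k < 2^(k+1) := lt_of_lt_of_le ih (Nat.pow_le_pow_right (by omega) (by omega))
    have h2 : (if p k then 2^(k+1) - 1 else 0) < 2^(k+1) := by
      split <;> [exact Nat.sub_lt (Nat.two_pow_pos _) (by omega); exact Nat.two_pow_pos _]
    exact pvXor_lt h1 h2

theorem pvAD_eq (p : Nat → Bool) : ∀ k b, pvAD p b k = (if b then 2^k - 1 else 0) ^^^ pvBX p k := by
  intro k
  induction k with
  | zero => intro b; cases b <;> simp [pvAD, pvBX]
  | succ k ih =>
    intro b
    have hmask : 2^k ^^^ (2^k - 1) = 2^(k+1) - 1 := by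
      have h1 : 2^k - 1 < 2^k := Nat.sub_lt (Nat.two_pow_pos _) (by omega)
      have := pvPow_add_eq_xor k h1
      have hp : 2^(k+1) = 2 * 2^k := by ring
      omega
    have hlt : (2^k - 1) ^^^ pvBX p k < 2^k :=
      pvXor_lt (Nat.sub_lt (Nat.two_pow_pos _) (by omega)) (pvBX_lt p k)
    cases hb : b <;> cases hp : p k
    · -- b = false, p k = false
      simp [pvAD, pvBX, hp, ih]
    · -- b = false, p k = true
      simp only [pvAD, pvBX, hp, ih, Bool.xor_true, Bool.not_false,
        ite_true, ite_false, Bool.false_eq_true, Nat.zero_xor]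
      rw [pvPow_add_eq_xor k hlt, ← Nat.xor_assoc, hmask, Nat.xor_comm]
    · -- b = true, p k = false
      simp only [pvAD, pvBX, hp, ih, Bool.xor_false, ite_true]
      rw [pvPow_add_eq_xor k hlt, ← Nat.xor_assoc, hmask]
      simp
    · -- b = true, p k = true
      simp only [pvAD, pvBX, hp, ih, Bool.xor_true, Bool.not_true, ite_true, ite_false,
        Bool.false_eq_true, Nat.zero_add, Nat.zero_xor]
      rw [Nat.xor_comm (pvBX p k), ← Nat.xor_assoc, Nat.xor_self, Nat.zero_xor]

-- Bridge for A: the Int fold over range(k-1, -1, -1) computes pvAD.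
theorem pvBridgeA (n : Int) (subset : List Int) : ∀ (k : Nat) (r : Nat) (b : Bool),
    ((PySem.List.pyRange ((k:Int)-1) (-1) (-1)).foldl
      (fun (s : Int × Int) i =>
        let b := if subset.contains (n - i) then 1 - s.2 else s.2
        ((if b == 1 then s.1 + (2:Int) ^ i.toNat else s.1), b))
      ((r:Int), if b then 1 else 0)).1
    = ((r + pvAD (fun j => subset.contains (n - (j:Int))) b k : Nat) : Int) := by
  intro k
  induction k with
  | zero =>
    intro r b
    rw [show ((0:Nat):Int) - 1 = -1 by norm_num, PySem.List.pyRange_neg_one_eq_nil (by norm_num)]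
    simp [pvAD]
  | succ k ih =>
    intro r b
    rw [show ((k+1:Nat):Int) - 1 = (k:Int) by push_cast; ring,
      PySem.List.pyRange_neg_one_cons (by omega), List.foldl_cons]
    by_cases hp : subset.contains (n - (k:Int)) = true <;> cases b <;>
      simp only [hp, if_true, Bool.false_eq_true, if_false, sub_zero,
        sub_self, Int.toNat_natCast, show ((1:Int) == 1) = true from rfl,
        show ((0:Int) == 1) = false from rfl]
    · -- p k = true, b = false : state becomes (r + 2^k, 1)
      have h := ih (r + 2^k) true
      simp only [if_true] at h
      rw [show ((r + 2^k : Nat) : Int) = (r:Int) + 2^k by push_cast; ring] at h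
      rw [h, show pvAD (fun j => subset.contains (n - (j:Int))) false (k+1)
            = 2^k + pvAD (fun j => subset.contains (n - (j:Int))) true k by
              have hm : n - (k:Int) ∈ subset := by simpa using hp
              simp [pvAD, hm]]
      push_cast; ring
    · -- p k = true, b = true : state becomes (r, 0)
      have h := ih r false
      simp only [Bool.false_eq_true, if_false] at h
      rw [h, show pvAD (fun j => subset.contains (n - (j:Int))) true (k+1)
            = pvAD (fun j => subset.contains (n - (j:Int))) false k by
              have hm : n - (k:Int) ∈ subset := by simpa using hp
              simp [pvAD, hm]]
    · -- p k = false, b = false : state stays (r, 0)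
      have h := ih r false
      simp only [Bool.false_eq_true, if_false] at h
      rw [h, show pvAD (fun j => subset.contains (n - (j:Int))) false (k+1)
            = pvAD (fun j => subset.contains (n - (j:Int))) false k by
              have hm : ¬(n - (k:Int) ∈ subset) := by simpa using hp
              simp [pvAD, hm]]
    · -- p k = false, b = true : state becomes (r + 2^k, 1)
      have h := ih (r + 2^k) true
      simp only [if_true] at h
      rw [show ((r + 2^k : Nat) : Int) = (r:Int) + 2^k by push_cast; ring] at h
      rw [h, show pvAD (fun j => subset.contains (n - (j:Int))) true (k+1)
            = 2^k + pvAD (fun j => subset.contains (n - (j:Int))) true k by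
              have hm : ¬(n - (k:Int) ∈ subset) := by simpa using hp
              simp [pvAD, hm]]
      push_cast; ring

-- Bridge for B: the Int fold over range(0, m, 1) computes pvBX.
theorem pvBridgeB (n : Int) (subset : List Int) : ∀ (m : Nat),
    (PySem.List.pyRange 0 (m:Int) 1).foldl
      (fun r i =>
        if subset.contains (n - i) then PySem.Int.bxor r ((1 <<< (i+1).toNat) - 1) else r)
      0
    = ((pvBX (fun j => subset.contains (n - (j:Int))) m : Nat) : Int) := by
  intro m
  induction m with
  | zero =>
    rw [PySem.List.pyRange_one_eq_nil (by norm_num)]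
    simp [pvBX]
  | succ m ih =>
    rw [show ((m+1:Nat):Int) = (m:Int) + 1 by push_cast; ring,
      PySem.List.pyRange_one_succ_right (by exact_mod_cast Nat.zero_le m),
      List.foldl_append, ih, List.foldl_cons, List.foldl_nil]
    by_cases hp : subset.contains (n - (m:Int)) = true <;>
      simp only [hp, if_true]
    · have h1 : 1 ≤ 2^(m+1) := Nat.one_le_two_pow
      rw [show ((m:Int) + 1).toNat = m + 1 by omega,
        show ((1 <<< (m+1) : Nat) : Int) = ((2^(m+1) : Nat) : Int) by norm_num [Nat.shiftLeft_eq],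
        show ((2^(m+1):Nat):Int) - 1 = ((2^(m+1) - 1 : Nat):Int) by rw [Int.natCast_sub h1]; simp,
        PySem.Int.bxor_natCast]
      norm_cast
      have hm : n - (m:Int) ∈ subset := by simpa using hp
      simp [pvBX, hm]
    · have hm : ¬(n - (m:Int) ∈ subset) := by simpa using hp
      simp [pvBX, hm]

-- ===== VERDICT (by name: the statement is the Claim_ definition above) =====
theorem grayCodeRank_spec : Claim_equal_grayCodeRank := by
  intro n subset _
  unfold Spec_grayCodeRank grayCodeRank grayCodeRank_alt
  rcases le_or_gt n 0 with hn | hn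
  · rw [PySem.List.pyRange_neg_one_eq_nil (by omega), PySem.List.pyRange_one_eq_nil hn]
    simp
  · obtain ⟨m, rfl⟩ : ∃ m : Nat, n = (m:Int) := ⟨n.toNat, (Int.toNat_of_nonneg hn.le).symm⟩
    have hA := pvBridgeA ((m:Int)) subset m 0 false
    simp only [Nat.cast_zero, Bool.false_eq_true, if_false, Nat.zero_add] at hA
    rw [hA, pvBridgeB ((m:Int)) subset m, pvAD_eq]
    simp
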